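-- pv_equiv track=rewrite | github.com/edo-pasto/Parallel-Flexible-Clustering | parallel-flexible-clustering-master/parallel_flexible_clustering/parallel_hnsw_example.py | create_members
-- ===== SOURCE A (Python) =====
-- def create_members(levels):
--     """Function used to create in the correct way each level of the HNSW
--
--     Parameters
--     ----------
--     levels : list of tuple
--            the level of each point
--     Returns
--     -------
--     members : list of list
--         the composition of each level of the HNSW
--     """
--     members = [[]]
--     j = 1
--     level_j = []
--     for i in levels:
--         elem, level = i
--         if level > j:
--             members.append(level_j)
--             level_j = []
--             j = j + 1
--         level_j.append(elem)
--         if j - 1 > 0: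
--             for i in range(j - 1, 0, -1):
--                 members[i].append(elem)
--     members.append(level_j)
--     for i, l in zip(range(len(members)), members):
--         sort = sorted(l)
--         members[i] = sort
--     del members[0]
--     return members
-- ===== SOURCE B (Python) =====
-- def create_members(levels):
--     """Same result as A: assign each element a group rank in one pass,
--     then build each level by filtering and sorting."""
--     j = 1
--     recorded = []
--     for elem, level in levels:
--         if level > j:
--             j += 1
--         recorded.append((elem, j))
--     return [sorted(e for e, g in recorded if g >= k) for k in range(1, j + 1)]
-- ===== Notes on version B (the rewrite author's own statement) =====
-- stated objective: simpler
-- what changed: Replaces A's mutable multi-list bookkeeping (push each element into every lower level, flush a running buffer, sort in place, delete the sentinel head) by one pass recording each element's group rank followed by a sorted filter per level.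
import Mathlib
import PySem

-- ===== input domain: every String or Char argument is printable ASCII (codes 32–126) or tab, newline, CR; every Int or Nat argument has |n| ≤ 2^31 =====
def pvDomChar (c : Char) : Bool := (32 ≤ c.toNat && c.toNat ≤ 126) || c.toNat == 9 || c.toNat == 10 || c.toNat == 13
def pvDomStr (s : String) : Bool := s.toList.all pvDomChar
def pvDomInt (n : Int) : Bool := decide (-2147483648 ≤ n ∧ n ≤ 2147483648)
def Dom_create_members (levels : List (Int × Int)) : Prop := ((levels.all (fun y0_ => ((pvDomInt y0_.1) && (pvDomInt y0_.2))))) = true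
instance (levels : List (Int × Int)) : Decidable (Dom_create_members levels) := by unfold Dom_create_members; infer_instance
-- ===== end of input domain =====

-- B replaces A's mutable multi-list bookkeeping by one pass recording each element's
-- group rank followed by a sorted filter per level (simpler; same return value).

-- ===== PORT A =====
-- one step of A's main for-loop; state = (members, j, level_j)
def cmStepA (st : List (List Int) × Int × List Int) (i : Int × Int) :
    List (List Int) × Int × List Int :=
  let members := st.1
  let j := st.2.1
  let level_j := st.2.2
  let elem := i.1
  let level := i.2
  -- if level > j: members.append(level_j); level_j = []; j = j + 1
  let st2 : List (List Int) × Int × List Int :=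
    if level > j then (members ++ [level_j], j + 1, ([] : List Int)) else (members, j, level_j)
  let members := st2.1
  let j := st2.2.1
  let level_j := st2.2.2 ++ [elem]          -- level_j.append(elem)
  -- if j - 1 > 0: for i in range(j-1, 0, -1): members[i].append(elem)
  let members :=
    if j - 1 > 0 then
      (PySem.List.pyRange (j - 1) 0 (-1)).foldl
        (fun ms (k : Int) => ms.modify k.toNat (fun l => l ++ [elem])) members
    else members
  (members, j, level_j)

def create_members (levels : List (Int × Int)) : List (List Int) :=
  let st := levels.foldl cmStepA ([[]], 1, ([] : List Int))
  let members := st.1 ++ [st.2.2]           -- members.append(level_j)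
  -- for i, l in zip(range(len(members)), members): members[i] = sorted(l)
  let members := (PySem.List.enumerate members).foldl
    (fun ms (p : Int × List Int) => ms.set p.1.toNat (PySem.List.sorted p.2 (fun x => x) false)) members
  members.tail                               -- del members[0]

-- ===== PORT B =====
def create_members_alt (levels : List (Int × Int)) : List (List Int) :=
  let st := levels.foldl
    (fun (st : Int × List (Int × Int)) (i : Int × Int) =>
      let j := if i.2 > st.1 then st.1 + 1 else st.1
      (j, st.2 ++ [(i.1, j)]))
    (1, ([] : List (Int × Int)))
  (PySem.List.pyRange 1 (st.1 + 1) 1).map (fun k =>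
    PySem.List.sorted ((st.2.filter (fun p => p.2 ≥ k)).map Prod.fst) (fun x => x) false)

-- ===== PRECONDITION & SPEC =====
def Spec_create_members (levels : List (Int × Int)) (out : List (List Int)) : Prop := out = create_members_alt levels
instance (levels : List (Int × Int)) (out : List (List Int)) : Decidable (Spec_create_members levels out) := by unfold Spec_create_members; infer_instance

-- ===== CLAIM (what is proved, stated in full; the proofs are below) =====
def Claim_equal_create_members : Prop := ∀ (levels : List (Int × Int)), Dom_create_members levels → Spec_create_members levels (create_members levels)

-- ===== LEMMAS AND PROOFS =====

-- B's one-pass recording step, named for the proofs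
def cmStepB (st : Int × List (Int × Int)) (i : Int × Int) : Int × List (Int × Int) :=
  let j := if i.2 > st.1 then st.1 + 1 else st.1
  (j, st.2 ++ [(i.1, j)])

-- A's "members" list expressed from B's recorded pairs: index 0 is the sentinel empty
-- list, index k (1 ≤ k < j) holds the elements whose group rank is ≥ k
def cmMem (recorded : List (Int × Int)) (j : Int) : List (List Int) :=
  (List.range j.toNat).map (fun (k : Nat) =>
    if k = 0 then [] else (recorded.filter (fun p => (k : Int) ≤ p.2)).map Prod.fst)

-- A's buffer level_j: the elements of the current (highest) group rank j
def cmLvl (recorded : List (Int × Int)) (j : Int) : List Int :=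
  (recorded.filter (fun p => p.2 = j)).map Prod.fst

lemma cm_fold_modify_nodup (f : List Int → List Int) :
    ∀ (L : List Int), L.Nodup → (∀ x ∈ L, 0 ≤ x) →
    ∀ (ms : List (List Int)) (i : Nat),
    ((L.foldl (fun (a : List (List Int)) (k : Int) => a.modify k.toNat f) ms))[i]?
    = if (i : Int) ∈ L then (ms[i]?).map f else ms[i]? := by
  intro L
  induction L with
  | nil => intro _ _ ms i; simp
  | cons x L ih =>
      intro hnd hpos ms i
      simp only [List.foldl_cons]
      rw [ih hnd.of_cons (fun y hy => hpos y (List.mem_cons_of_mem _ hy))]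
      have hx : 0 ≤ x := hpos x (List.mem_cons_self)
      have hmod : (ms.modify x.toNat f)[i]? = if (i : Int) = x then (ms[i]?).map f else ms[i]? := by
        rw [List.getElem?_modify]
        by_cases hix : (i : Int) = x
        · have : x.toNat = i := by omega
          simp [this, hix]
        · have : x.toNat ≠ i := by omega
          simp [this, hix]
      by_cases hmem : (i : Int) ∈ L
      · have hne : (i : Int) ≠ x := by
          rintro rfl; exact (List.nodup_cons.mp hnd).1 hmem
        simp [hmem, hmod, hne]
      · by_cases hix : (i : Int) = x
        · rw [if_neg hmem, hmod, if_pos hix]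
          have hc : (i : Int) ∈ x :: L := by simp [hix]
          rw [if_pos hc]
        · rw [if_neg hmem, hmod, if_neg hix]
          have hc : (i : Int) ∉ x :: L := by simp [hix, hmem]
          rw [if_neg hc]

-- the descending modify loop appends elem to every index 1..m of a range-map list
lemma cm_modify_desc (m : Int) (n : Nat) (elem : Int) (f : Nat → List Int) :
    (PySem.List.pyRange m 0 (-1)).foldl
      (fun ms (k : Int) => ms.modify k.toNat (fun l => l ++ [elem])) ((List.range n).map f)
    = (List.range n).map (fun (k : Nat) =>
        if 1 ≤ k ∧ (k : Int) ≤ m then f k ++ [elem] else f k) := by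
  have hnd : (PySem.List.pyRange m 0 (-1)).Nodup := by
    rw [PySem.List.pyRange_neg_one_eq_reverse]
    exact List.nodup_reverse.mpr (PySem.List.nodup_pyRange_one _ _)
  have hpos : ∀ x ∈ PySem.List.pyRange m 0 (-1), 0 ≤ x := by
    intro x hx
    have := (PySem.List.mem_pyRange_neg_one).mp hx
    omega
  apply List.ext_getElem?
  intro i
  rw [cm_fold_modify_nodup _ _ hnd hpos]
  simp only [PySem.List.mem_pyRange_neg_one]
  by_cases hi : i < n
  · simp only [List.getElem?_map, List.getElem?_range, hi]
    by_cases hc : 0 < (i : Int) ∧ (i : Int) ≤ m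
    · have : 1 ≤ i ∧ (i : Int) ≤ m := by omega
      simp [hc, this]
      omega
    · have : ¬ (1 ≤ i ∧ (i : Int) ≤ m) := by omega
      simp [this]
      omega
  · have h1 : ((List.range n).map f)[i]? = none := by
      simp; omega
    have h2 : ((List.range n).map (fun (k : Nat) =>
        if 1 ≤ k ∧ (k : Int) ≤ m then f k ++ [elem] else f k))[i]? = none := by
      simp; omega
    rw [h1, h2]
    split <;> rfl

-- snoc of the buffer: members ++ [level_j] as one range-map (needs every rank ≤ j)
lemma cm_snoc (recorded : List (Int × Int)) (j : Int) (h1 : 1 ≤ j)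
    (h2 : ∀ p ∈ recorded, p.2 ≤ j) :
    cmMem recorded j ++ [cmLvl recorded j]
    = (List.range (j.toNat + 1)).map (fun (k : Nat) =>
        if k = 0 then [] else (recorded.filter (fun p => (k : Int) ≤ p.2)).map Prod.fst) := by
  rw [List.range_succ, List.map_append, cmMem]
  congr 1
  simp only [List.map_cons, List.map_nil]
  have hj0 : j.toNat ≠ 0 := by omega
  rw [if_neg hj0]
  congr 2
  · rw [cmLvl]
    congr 1
    apply List.filter_congr
    intro p hp
    have := h2 p hp
    have hcast : ((j.toNat : Int)) = j := by omega
    simp only [hcast, decide_eq_decide]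
    omega

-- one loop step of A, expressed through B's recording step
lemma cm_step (elem level j : Int) (recorded : List (Int × Int))
    (h1 : 1 ≤ j) (h2 : ∀ p ∈ recorded, p.2 ≤ j) :
    cmStepA (cmMem recorded j, j, cmLvl recorded j) (elem, level)
    = ((cmMem (cmStepB (j, recorded) (elem, level)).2 (cmStepB (j, recorded) (elem, level)).1),
       (cmStepB (j, recorded) (elem, level)).1,
       (cmLvl (cmStepB (j, recorded) (elem, level)).2 (cmStepB (j, recorded) (elem, level)).1)) := by
  by_cases hl : level > j
  · -- j increments: the buffer is flushed and elem goes into every index 1..j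
    simp only [cmStepA, cmStepB, gt_iff_lt, hl, if_true]
    have hguard : j + 1 - 1 > 0 := by omega
    rw [if_pos hguard]
    have hm : j + 1 - 1 = j := by ring
    rw [hm, cm_snoc recorded j h1 h2, cm_modify_desc]
    refine Prod.ext ?_ (Prod.ext rfl ?_)
    · simp only
      have htn : (j + 1).toNat = j.toNat + 1 := by omega
      rw [cmMem, htn]
      apply List.map_congr_left
      intro k hk
      rw [List.mem_range] at hk
      by_cases hk0 : k = 0
      · simp [hk0]
      · have hk1 : 1 ≤ k := by omega
        have hkj : (k : Int) ≤ j := by omega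
        rw [if_pos ⟨hk1, hkj⟩, if_neg hk0, if_neg hk0]
        rw [List.filter_append, List.map_append]
        congr 1
        have : (fun p : Int × Int => decide ((k : Int) ≤ p.2)) (elem, j + 1) = true := by
          simp; omega
        simp [this]
    · simp only [cmLvl]
      rw [List.filter_append]
      have hnone : recorded.filter (fun p => decide (p.2 = j + 1)) = [] := by
        apply List.filter_eq_nil_iff.mpr
        intro p hp
        have := h2 p hp
        simp; omega
      rw [hnone]
      simp
  · -- j unchanged
    simp only [cmStepA, cmStepB, gt_iff_lt, hl, if_false]
    refine Prod.ext ?_ (Prod.ext rfl ?_)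
    · simp only
      by_cases hguard : j - 1 > 0
      · rw [if_pos hguard, cmMem, cm_modify_desc, cmMem]
        apply List.map_congr_left
        intro k hk
        rw [List.mem_range] at hk
        by_cases hk0 : k = 0
        · simp [hk0]
        · have hk1 : 1 ≤ k := by omega
          have hkj : (k : Int) ≤ j - 1 := by omega
          rw [if_pos ⟨hk1, hkj⟩, if_neg hk0, if_neg hk0]
          rw [List.filter_append, List.map_append]
          congr 1
          have : (fun p : Int × Int => decide ((k : Int) ≤ p.2)) (elem, j) = true := by
            simp; omega
          simp [this]
      · rw [if_neg hguard]
        have hj1 : j = 1 := by omega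
        subst hj1
        simp [cmMem]
    · simp only [cmLvl]
      rw [List.filter_append]
      simp

lemma cmB_bounds : ∀ (levels : List (Int × Int)) (j : Int) (recorded : List (Int × Int)),
    1 ≤ j → (∀ p ∈ recorded, p.2 ≤ j) →
    1 ≤ (levels.foldl cmStepB (j, recorded)).1 ∧
    (∀ p ∈ (levels.foldl cmStepB (j, recorded)).2, p.2 ≤ (levels.foldl cmStepB (j, recorded)).1) := by
  intro levels
  induction levels with
  | nil => intro j recorded h1 h2; exact ⟨h1, h2⟩
  | cons x xs ih =>
      intro j recorded h1 h2
      simp only [List.foldl_cons]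
      have hj' : 1 ≤ (cmStepB (j, recorded) x).1 := by
        simp only [cmStepB]; split <;> omega
      have hr' : ∀ p ∈ (cmStepB (j, recorded) x).2, p.2 ≤ (cmStepB (j, recorded) x).1 := by
        simp only [cmStepB]
        intro p hp
        rcases List.mem_append.mp hp with h | h
        · have := h2 p h; split <;> simp <;> omega
        · simp at h; subst h; simp
      exact ih _ _ hj' hr'

-- main loop invariant: A's state is cmMem/cmLvl of B's state, all along the fold
lemma cm_inv : ∀ (levels : List (Int × Int)) (j : Int) (recorded : List (Int × Int)),
    1 ≤ j → (∀ p ∈ recorded, p.2 ≤ j) →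
    levels.foldl cmStepA (cmMem recorded j, j, cmLvl recorded j)
      = ((cmMem (levels.foldl cmStepB (j, recorded)).2 (levels.foldl cmStepB (j, recorded)).1),
         (levels.foldl cmStepB (j, recorded)).1,
         (cmLvl (levels.foldl cmStepB (j, recorded)).2 (levels.foldl cmStepB (j, recorded)).1)) := by
  intro levels
  induction levels with
  | nil => intro j recorded _ _; rfl
  | cons x xs ih =>
      intro j recorded h1 h2
      simp only [List.foldl_cons]
      obtain ⟨elem, level⟩ := x
      rw [cm_step elem level j recorded h1 h2]
      have hj' : 1 ≤ (cmStepB (j, recorded) (elem, level)).1 := by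
        simp only [cmStepB]; split <;> omega
      have hr' : ∀ p ∈ (cmStepB (j, recorded) (elem, level)).2,
          p.2 ≤ (cmStepB (j, recorded) (elem, level)).1 := by
        simp only [cmStepB]
        intro p hp
        rcases List.mem_append.mp hp with h | h
        · have := h2 p h; split <;> simp <;> omega
        · simp at h; subst h; simp
      exact ih _ _ hj' hr'

-- A's in-place sorting pass over zip(range(len(members)), members) is map sorted
lemma cm_set_fold (g : List Int → List Int) :
    ∀ (ms : List (List Int)) (s : Nat) (acc : List (List Int)),
    acc.length = s + ms.length →
    (PySem.List.enumerate ms (s : Int)).foldl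
      (fun a (p : Int × List Int) => a.set p.1.toNat (g p.2)) acc
    = acc.take s ++ ms.map g := by
  intro ms
  induction ms with
  | nil =>
      intro s acc h
      simp only [List.length_nil] at h
      simp only [PySem.List.enumerate_nil, List.foldl_nil, List.map_nil, List.append_nil]
      rw [List.take_of_length_le (by omega)]
  | cons x xs ih =>
      intro s acc h
      simp only [List.length_cons] at h
      rw [PySem.List.enumerate_cons]
      simp only [List.foldl_cons]
      have hcast : ((s : Int) + 1) = ((s + 1 : Nat) : Int) := by push_cast; ring
      rw [hcast, ih (s + 1) (acc.set (s : Int).toNat (g x)) (by simp; omega)]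
      have hs : s < acc.length := by omega
      have htake : (acc.set (s : Int).toNat (g x)).take (s + 1) = acc.take s ++ [g x] := by
        simp only [Int.toNat_natCast]
        apply List.ext_getElem
        · simp [List.length_take]; omega
        · intro i h1 h2
          simp only [List.length_take, List.length_set] at h1
          by_cases hi : i < s
          · simp [List.getElem_take, List.getElem_append, hi, Nat.ne_of_gt, List.length_take]
            intro hsi; omega
          · have : i = s := by omega
            subst this
            simp [List.getElem_take, List.length_take]
      rw [htake]
      simp

theorem final_eq (levels : List (Int × Int)) : create_members levels = create_members_alt levels := by
  unfold create_members create_members_alt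
  simp only
  have hinit : (([[]], 1, ([] : List Int)) : List (List Int) × Int × List Int)
      = (cmMem [] 1, 1, cmLvl [] 1) := by
    simp [cmMem, cmLvl, List.range]
    rfl
  rw [hinit, cm_inv levels 1 [] (by omega) (by simp)]
  set J := (levels.foldl cmStepB (1, [])).1 with hJ
  set R := (levels.foldl cmStepB (1, [])).2 with hR
  obtain ⟨hJ1, hRb⟩ := cmB_bounds levels 1 [] (by omega) (by simp)
  rw [cm_snoc R J hJ1 hRb]
  have hfoldB : levels.foldl
      (fun (st : Int × List (Int × Int)) (i : Int × Int) =>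
        let j := if i.2 > st.1 then st.1 + 1 else st.1
        (j, st.2 ++ [(i.1, j)])) (1, ([] : List (Int × Int)))
      = levels.foldl cmStepB (1, []) := rfl
  rw [hfoldB, ← hJ, ← hR]
  rw [show (PySem.List.enumerate ((List.range (J.toNat + 1)).map (fun (k : Nat) =>
        if k = 0 then [] else (R.filter (fun p => (k : Int) ≤ p.2)).map Prod.fst)))
      = PySem.List.enumerate ((List.range (J.toNat + 1)).map (fun (k : Nat) =>
        if k = 0 then [] else (R.filter (fun p => (k : Int) ≤ p.2)).map Prod.fst)) ((0 : Nat) : Int) from by norm_num]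
  rw [cm_set_fold (fun l => PySem.List.sorted l (fun x => x) false)
      ((List.range (J.toNat + 1)).map (fun (k : Nat) =>
        if k = 0 then [] else (R.filter (fun p => (k : Int) ≤ p.2)).map Prod.fst)) 0 _ (by simp)]
  simp only [List.take_zero, List.nil_append, List.map_map]
  rw [List.range_succ_eq_map, List.map_cons, List.tail_cons, List.map_map]
  rw [PySem.List.pyRange_one]
  have : ((J + 1 - 1)).toNat = J.toNat := by omega
  rw [this, List.map_map]
  apply List.map_congr_left
  intro k hk
  simp only [Function.comp]
  have hk0 : ¬ (k + 1 = 0) := by omega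
  rw [if_neg hk0]
  congr 1
  congr 1
  apply List.filter_congr
  intro p hp
  simp only [ge_iff_le, decide_eq_decide]
  push_cast
  omega

-- ===== VERDICT (by name: the statement is the Claim_ definition above) =====
theorem create_members_spec : Claim_equal_create_members := by
  intro levels _
  unfold Spec_create_members
  exact final_eq levels
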